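-- pv_equiv track=rewrite | github.com/inocult/studio3-docs | fix_arena_list_spacing.py | fix_arena_list_spacing
-- ===== SOURCE A (Python) =====
-- def fix_arena_list_spacing(content):
--     """Fix list spacing issues in arena cards."""
--     lines = content.split('\n')
--     fixed_lines = []
--     i = 0
--
--     while i < len(lines):
--         line = lines[i]
--         fixed_lines.append(line)
--
--         # Check if current line ends with ** (end of bold text) or ends with :
--         # and next line starts with - (list item)
--         if i + 1 < len(lines):
--             current_line = line.strip()
--             next_line = lines[i + 1].strip()
--
--             # Check if we're inside an arena-card
--             in_arena = False
--             for j in range(max(0, i - 20), i):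
--                 if j < len(lines) and 'arena-card' in lines[j]:
--                     in_arena = True
--                     break
--
--             if in_arena:
--                 # If current line ends with ** or : and next line is a list item
--                 if ((current_line.endswith('**') or current_line.endswith(':')) and
--                     next_line.startswith(('-', '*', '1.', '2.', '3.', '4.', '5.', '6.', '7.', '8.', '9.'))):
--                     # Check if there's already a blank line
--                     if i + 1 < len(lines) and lines[i + 1].strip() != '':
--                         fixed_lines.append('')  # Add blank line
--
--         i += 1
--
--     return '\n'.join(fixed_lines)
-- ===== SOURCE B (Python) =====
-- def fix_arena_list_spacing(content):
--     """Fix list spacing issues in arena cards (single pass, no back-scan)."""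
--     lines = content.split('\n')
--     fixed_lines = []
--     last_arena = None
--     for i, line in enumerate(lines):
--         fixed_lines.append(line)
--         if i + 1 < len(lines):
--             if last_arena is not None and i - last_arena <= 20:
--                 current_line = line.strip()
--                 next_line = lines[i + 1].strip()
--                 if ((current_line.endswith('**') or current_line.endswith(':')) and
--                         next_line.startswith(('-', '*', '1.', '2.', '3.', '4.', '5.', '6.', '7.', '8.', '9.'))):
--                     fixed_lines.append('')
--         if 'arena-card' in line:
--             last_arena = i
--     return '\n'.join(fixed_lines)
-- ===== Notes on version B (the rewrite author's own statement) =====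
-- stated objective: alternative
-- what changed: Replaces the per-line 20-line back-scan for the arena-card marker with a single running last-seen-index carried through one pass, and drops the blank-next-line guard that the list-item prefix test already implies.
import Mathlib
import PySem

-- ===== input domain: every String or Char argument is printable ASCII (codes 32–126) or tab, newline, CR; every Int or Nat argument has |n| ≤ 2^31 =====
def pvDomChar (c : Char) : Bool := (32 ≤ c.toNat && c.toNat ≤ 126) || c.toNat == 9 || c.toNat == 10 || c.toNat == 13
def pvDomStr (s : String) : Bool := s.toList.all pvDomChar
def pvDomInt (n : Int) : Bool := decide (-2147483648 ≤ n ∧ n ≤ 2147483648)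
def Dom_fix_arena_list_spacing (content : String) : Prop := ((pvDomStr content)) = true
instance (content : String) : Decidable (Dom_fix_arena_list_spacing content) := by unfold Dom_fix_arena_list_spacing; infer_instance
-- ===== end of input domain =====

-- B replaces the per-line 20-line back-scan for the arena-card marker with a single running last-seen index carried through one pass (objective: alternative).


-- ===== PORT A =====
-- next_line.startswith(('-', '*', '1.', …, '9.'))  (shared by both ports)
def pvStartsList (s : String) : Bool :=
  PySem.Str.startswith s "-" || PySem.Str.startswith s "*" ||
  PySem.Str.startswith s "1." || PySem.Str.startswith s "2." ||
  PySem.Str.startswith s "3." || PySem.Str.startswith s "4." ||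
  PySem.Str.startswith s "5." || PySem.Str.startswith s "6." ||
  PySem.Str.startswith s "7." || PySem.Str.startswith s "8." ||
  PySem.Str.startswith s "9."

-- A's inner back-scan: for j in range(max(0, i-20), i): if 'arena-card' in lines[j]: found; break
def pvArenaScan (lines : List String) (i : Int) : Bool :=
  (PySem.List.pyRange (max 0 (i - 20)) i 1).foldl
    (fun found j =>
      found || (decide (j < (lines.length : Int)) &&
                PySem.Str.isIn "arena-card" (PySem.List.pyGetD lines j "")))
    false

-- one iteration of A's while-loop (i the current index, acc = fixed_lines)
def pvStepA (lines : List String) (acc : List String) (i : Int) : List String :=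
  let line := PySem.List.pyGetD lines i ""
  let acc' := acc ++ [line]
  if i + 1 < (lines.length : Int) then
    let current_line := PySem.Str.strip line
    let next_line := PySem.Str.strip (PySem.List.pyGetD lines (i + 1) "")
    if pvArenaScan lines i then
      if (PySem.Str.endswith current_line "**" || PySem.Str.endswith current_line ":")
          && pvStartsList next_line then
        if i + 1 < (lines.length : Int) ∧
            PySem.Str.strip (PySem.List.pyGetD lines (i + 1) "") ≠ "" then
          acc' ++ [""]
        else acc'
      else acc'
    else acc'
  else acc'

def fix_arena_list_spacing (content : String) : String :=
  let lines := (PySem.Str.split? content "\n").getD []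
  PySem.Str.join "\n"
    ((PySem.List.pyRange 0 (lines.length : Int) 1).foldl (pvStepA lines) [])

-- ===== PORT B =====
-- one iteration of B's for-loop over enumerate(lines); state = (fixed_lines, last_arena)
def pvStepB (lines : List String) (st : List String × Option Int) (p : Int × String) :
    List String × Option Int :=
  let fixed := st.1 ++ [p.2]
  let fixed :=
    if p.1 + 1 < (lines.length : Int) then
      if (match st.2 with
          | some j => decide (p.1 - j ≤ 20)
          | none => false) then
        let current_line := PySem.Str.strip p.2
        let next_line := PySem.Str.strip (PySem.List.pyGetD lines (p.1 + 1) "")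
        if (PySem.Str.endswith current_line "**" || PySem.Str.endswith current_line ":")
            && pvStartsList next_line then
          fixed ++ [""]
        else fixed
      else fixed
    else fixed
  (fixed, if PySem.Str.isIn "arena-card" p.2 then some p.1 else st.2)

def fix_arena_list_spacing_alt (content : String) : String :=
  let lines := (PySem.Str.split? content "\n").getD []
  PySem.Str.join "\n"
    ((PySem.List.enumerate lines).foldl (pvStepB lines) ([], none)).1

-- ===== PRECONDITION & SPEC =====
def Spec_fix_arena_list_spacing (content : String) (out : String) : Prop := out = fix_arena_list_spacing_alt content
instance (content : String) (out : String) : Decidable (Spec_fix_arena_list_spacing content out) := by unfold Spec_fix_arena_list_spacing; infer_instance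

-- ===== CLAIM (what is proved, stated in full; the proofs are below) =====
def Claim_equal_fix_arena_list_spacing : Prop := ∀ (content : String), Dom_fix_arena_list_spacing content → Spec_fix_arena_list_spacing content (fix_arena_list_spacing content)

-- ===== LEMMAS AND PROOFS =====

-- the most recent index j < k (k a Nat) whose line contains 'arena-card'
def pvLastArena (lines : List String) : Nat → Option Int
  | 0 => none
  | k + 1 =>
      if PySem.Str.isIn "arena-card" (PySem.List.pyGetD lines (k : Int) "") then some (k : Int)
      else pvLastArena lines k

theorem pvFoldlOr (p : Int → Bool) (xs : List Int) (b : Bool) :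
    xs.foldl (fun r a => r || p a) b = (b || xs.any p) := by
  induction xs generalizing b with
  | nil => simp
  | cons x xs ih => simp [List.foldl, ih, Bool.or_assoc]

theorem pvArenaScan_eq_any (lines : List String) (i : Int) :
    pvArenaScan lines i =
      (PySem.List.pyRange (max 0 (i - 20)) i 1).any
        (fun j => decide (j < (lines.length : Int)) &&
                  PySem.Str.isIn "arena-card" (PySem.List.pyGetD lines j "")) := by
  simpa [pvArenaScan] using pvFoldlOr _ _ false

-- characterisation of pvLastArena
theorem pvLastArena_spec (lines : List String) (k : Nat) :
    (∀ m : Int, pvLastArena lines k = some m →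
        0 ≤ m ∧ m < (k : Int) ∧
        PySem.Str.isIn "arena-card" (PySem.List.pyGetD lines m "") = true ∧
        ∀ j : Int, m < j → j < (k : Int) →
          PySem.Str.isIn "arena-card" (PySem.List.pyGetD lines j "") = false) ∧
    (pvLastArena lines k = none →
        ∀ j : Int, 0 ≤ j → j < (k : Int) →
          PySem.Str.isIn "arena-card" (PySem.List.pyGetD lines j "") = false) := by
  induction k with
  | zero =>
      constructor
      · intro m h; simp [pvLastArena] at h
      · intro _ j h0 h1; omega
  | succ k ih =>
      constructor
      · intro m h
        rw [pvLastArena] at h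
        by_cases hc : PySem.Str.isIn "arena-card" (PySem.List.pyGetD lines (k : Int) "") = true
        · rw [if_pos hc] at h
          injection h with h
          subst h
          refine ⟨by positivity, by push_cast; omega, hc, ?_⟩
          intro j hj1 hj2; omega
        · rw [if_neg hc] at h
          obtain ⟨h0, h1, h2, h3⟩ := ih.1 m h
          refine ⟨h0, by push_cast; omega, h2, ?_⟩
          intro j hj1 hj2
          by_cases hjk : j = (k : Int)
          · subst hjk; simpa using hc
          · exact h3 j hj1 (by push_cast at hj2 ⊢; omega)
      · intro h j h0 h1
        rw [pvLastArena] at h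
        by_cases hc : PySem.Str.isIn "arena-card" (PySem.List.pyGetD lines (k : Int) "") = true
        · rw [if_pos hc] at h; exact absurd h (by simp)
        · rw [if_neg hc] at h
          by_cases hjk : j = (k : Int)
          · subst hjk; simpa using hc
          · exact ih.2 h j h0 (by push_cast at h1 ⊢; omega)

-- A's window scan agrees with B's running-state test, for k ≤ lines.length
theorem pvScan_eq_last (lines : List String) (k : Nat) (hk : k ≤ lines.length) :
    pvArenaScan lines (k : Int) =
      (match pvLastArena lines k with
       | some j => decide ((k : Int) - j ≤ 20)
       | none => false) := by
  rw [pvArenaScan_eq_any]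
  rcases hL : pvLastArena lines k with _ | m
  · simp only []
    rw [List.any_eq_false]
    intro j hj
    rw [PySem.List.mem_pyRange_one] at hj
    have hf := (pvLastArena_spec lines k).2 hL j (by omega) hj.2
    rw [Bool.not_eq_true]
    show (decide (j < (lines.length : Int)) &&
          PySem.Str.isIn "arena-card" (PySem.List.pyGetD lines j "")) = false
    rw [hf, Bool.and_false]
  · obtain ⟨h0, h1, h2, h3⟩ := (pvLastArena_spec lines k).1 m hL
    simp only []
    by_cases hw : (k : Int) - m ≤ 20
    · rw [decide_eq_true hw, List.any_eq_true]
      refine ⟨m, ?_, ?_⟩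
      · rw [PySem.List.mem_pyRange_one]; omega
      · have hm : m < (lines.length : Int) := by
          have hkn : (k : Int) ≤ (lines.length : Int) := by exact_mod_cast hk
          omega
        show (decide (m < (lines.length : Int)) &&
              PySem.Str.isIn "arena-card" (PySem.List.pyGetD lines m "")) = true
        rw [h2, decide_eq_true hm, Bool.and_self]
    · rw [decide_eq_false hw, List.any_eq_false]
      intro j hj
      rw [PySem.List.mem_pyRange_one] at hj
      have hf := h3 j (by omega) hj.2
      rw [Bool.not_eq_true]
      show (decide (j < (lines.length : Int)) &&
            PySem.Str.isIn "arena-card" (PySem.List.pyGetD lines j "")) = false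
      rw [hf, Bool.and_false]

theorem pvStartsList_ne_empty (s : String) (h : pvStartsList s = true) : s ≠ "" := by
  intro he; subst he
  exact absurd h (by decide)

-- the joint loop invariant: B's fold over the first k lines equals A's fold plus pvLastArena
theorem pvMain (lines : List String) (k : Nat) (hk : k ≤ lines.length) :
    ((PySem.List.pyRange 0 (k : Int) 1).map
        (fun j => (j, PySem.List.pyGetD lines j ""))).foldl (pvStepB lines) ([], none)
      = ((PySem.List.pyRange 0 (k : Int) 1).foldl (pvStepA lines) [], pvLastArena lines k) := by
  induction k with
  | zero => simp [pvLastArena]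
  | succ k ih =>
      have hk' : k ≤ lines.length := Nat.le_of_succ_le hk
      have hsplit : PySem.List.pyRange 0 ((k : Int) + 1) 1
          = PySem.List.pyRange 0 (k : Int) 1 ++ [(k : Int)] :=
        PySem.List.pyRange_one_succ_right (by positivity)
      have hcast : ((k + 1 : Nat) : Int) = (k : Int) + 1 := by push_cast; ring
      rw [hcast, hsplit, List.map_append, List.foldl_append, List.foldl_append, ih hk']
      simp only [List.map_cons, List.map_nil, List.foldl_cons, List.foldl_nil]
      -- one step
      have hscan := pvScan_eq_last lines k hk'
      rw [pvStepB, pvStepA]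
      simp only []
      rw [Prod.mk.injEq]
      refine ⟨?_, ?_⟩
      · rw [← hscan]
        split_ifs with h1 h2 h3 h4 <;> try rfl
        exact absurd ⟨h1, pvStartsList_ne_empty _ ((Bool.and_eq_true _ _).mp h3).2⟩ h4
      · rw [pvLastArena]

-- ===== VERDICT (by name: the statement is the Claim_ definition above) =====
theorem fix_arena_list_spacing_spec : Claim_equal_fix_arena_list_spacing := by
  intro content _
  unfold Spec_fix_arena_list_spacing fix_arena_list_spacing fix_arena_list_spacing_alt
  simp only []
  congr 1
  rw [PySem.List.enumerate_eq_map_pyRange _ ""]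
  rw [show PySem.List.len ((PySem.Str.split? content "\n").getD []) =
        (((PySem.Str.split? content "\n").getD []).length : Int) from rfl]
  rw [pvMain _ _ (le_refl _)]
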